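-- pv_equiv track=rewrite | github.com/pkeffect/functions | functions/filters/agent_hotswap/main.py | _sanitize_body_for_external_api
-- ===== SOURCE A (Python) =====
-- def _sanitize_body_for_external_api(body: dict) -> dict:
--     """Remove all custom fields before sending to external APIs"""
--     custom_fields = [
--         "_agent_hotswap_handled",
--         "_filter_context",
--         "_context_stored",
--         "_streaming_personas",
--         "_thinking_stripped",
--         "_original_thinking",
--     ]
--     sanitized_body = body.copy()
--     for field in custom_fields:
--         if field in sanitized_body:
--             del sanitized_body[field]
--     return sanitized_body
-- ===== SOURCE B (Python) =====
-- def _sanitize_body_for_external_api(body: dict) -> dict: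
--     """Remove all custom fields before sending to external APIs"""
--     custom_fields = {
--         "_agent_hotswap_handled",
--         "_filter_context",
--         "_context_stored",
--         "_streaming_personas",
--         "_thinking_stripped",
--         "_original_thinking",
--     }
--     return {k: v for k, v in body.items() if k not in custom_fields}
-- ===== Notes on version B (the rewrite author's own statement) =====
-- stated objective: simpler
-- what changed: B builds the result in one filtering pass over body.items() instead of copying the dict and then deleting each of the six known keys with a membership test per field.
import Mathlib
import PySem

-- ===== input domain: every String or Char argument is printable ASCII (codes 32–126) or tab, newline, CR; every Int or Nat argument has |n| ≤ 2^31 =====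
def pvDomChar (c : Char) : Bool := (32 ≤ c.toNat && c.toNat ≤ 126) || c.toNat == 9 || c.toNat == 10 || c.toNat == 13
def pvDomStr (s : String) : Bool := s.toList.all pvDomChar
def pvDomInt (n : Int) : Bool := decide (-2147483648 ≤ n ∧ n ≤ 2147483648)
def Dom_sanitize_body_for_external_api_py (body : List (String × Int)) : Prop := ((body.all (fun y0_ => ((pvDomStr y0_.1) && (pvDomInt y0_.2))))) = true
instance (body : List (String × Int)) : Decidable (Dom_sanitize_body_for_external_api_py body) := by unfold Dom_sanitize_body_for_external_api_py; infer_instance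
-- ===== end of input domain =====

-- B filters body once instead of copying it and deleting each known field: simpler, one pass over the data.

-- ===== PORT A =====
-- the six custom field names, in A's order
def pvCustomFields : List String :=
  ["_agent_hotswap_handled", "_filter_context", "_context_stored",
   "_streaming_personas", "_thinking_stripped", "_original_thinking"]

-- dict → assoc list; 'field in d' = some key equals field; 'del d[field]' = drop that key's entries
def sanitize_body_for_external_api_py (body : List (String × Int)) : List (String × Int) :=
  pvCustomFields.foldl
    (fun d field => if d.any (fun kv => kv.1 == field) then d.filter (fun kv => kv.1 != field) else d)
    body

-- ===== PORT B =====
-- B: single filtering pass over body.items(), keeping keys not in the custom-field set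
def sanitize_body_for_external_api_py_alt (body : List (String × Int)) : List (String × Int) :=
  body.filter (fun kv => !(pvCustomFields.contains kv.1))

-- ===== PRECONDITION & SPEC =====
def Spec_sanitize_body_for_external_api_py (body : List (String × Int)) (out : List (String × Int)) : Prop := out = sanitize_body_for_external_api_py_alt body
instance (body : List (String × Int)) (out : List (String × Int)) : Decidable (Spec_sanitize_body_for_external_api_py body out) := by unfold Spec_sanitize_body_for_external_api_py; infer_instance

-- ===== CLAIM (what is proved, stated in full; the proofs are below) =====
def Claim_equal_sanitize_body_for_external_api_py : Prop := ∀ (body : List (String × Int)), Dom_sanitize_body_for_external_api_py body → Spec_sanitize_body_for_external_api_py body (sanitize_body_for_external_api_py body)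

-- ===== LEMMAS AND PROOFS =====

-- A's membership guard is redundant: deleting an absent key is a no-op
theorem pv_step_eq (d : List (String × Int)) (field : String) :
    (if d.any (fun kv => kv.1 == field) then d.filter (fun kv => kv.1 != field) else d)
      = d.filter (fun kv => kv.1 != field) := by
  split
  · rfl
  · next h =>
    symm
    apply List.filter_eq_self.2
    intro kv hkv
    simp only [List.any_eq_true, not_exists, not_and] at h
    simpa [bne] using h kv hkv

-- folding A's per-field deletion over any field list is one filter against that list
theorem pv_foldl_eq (fs : List String) (d : List (String × Int)) :
    fs.foldl
      (fun d field => if d.any (fun kv => kv.1 == field) then d.filter (fun kv => kv.1 != field) else d)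
      d
      = d.filter (fun kv => !(fs.contains kv.1)) := by
  induction fs generalizing d with
  | nil => simp
  | cons f fs ih =>
    rw [List.foldl_cons, pv_step_eq, ih, List.filter_filter]
    apply List.filter_congr
    intro kv _
    by_cases hf : kv.1 = f <;> simp [hf, bne]

-- ===== VERDICT (by name: the statement is the Claim_ definition above) =====
theorem sanitize_body_for_external_api_py_spec : Claim_equal_sanitize_body_for_external_api_py := by
  intro body _
  unfold Spec_sanitize_body_for_external_api_py sanitize_body_for_external_api_py sanitize_body_for_external_api_py_alt
  exact pv_foldl_eq pvCustomFields body
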